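-- pv_equiv track=rewrite | github.com/kineticman/FastChannels | app/scrapers/localnow.py | _parse_internal_url
-- ===== SOURCE A (Python) =====
-- from typing import Any, Dict, List, Optional, Tuple
--
-- def _parse_internal_url(raw_url: str) -> Tuple[str, Optional[str]]:
--     value = raw_url.split("localnow://", 1)[1]
--     if "?" not in value:
--         return value, None
--
--     source_channel_id, query = value.split("?", 1)
--     slug = None
--     for chunk in query.split("&"):
--         if not chunk:
--             continue
--         if "=" not in chunk:
--             continue
--         key, val = chunk.split("=", 1)
--         if key == "slug":
--             slug = val
--             break
--     return source_channel_id, slug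
-- ===== SOURCE B (Python) =====
-- from typing import Optional, Tuple
--
-- def _parse_internal_url(raw_url: str) -> Tuple[str, Optional[str]]:
--     value = raw_url.split("localnow://", 1)[1]
--     if "?" not in value:
--         return value, None
--     source_channel_id, query = value.split("?", 1)
--     padded = "&" + query
--     i = padded.find("&slug=")
--     if i < 0:
--         return source_channel_id, None
--     return source_channel_id, padded[i + 6:].split("&", 1)[0]
-- ===== Notes on version B (the rewrite author's own statement) =====
-- stated objective: alternative
-- what changed: The chunk-by-chunk loop over query.split('&') with continue/break and per-chunk split('=',1) is replaced by a single substring search for '&slug=' in '&'+query followed by one split('&',1) to cut the value.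
import Mathlib
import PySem

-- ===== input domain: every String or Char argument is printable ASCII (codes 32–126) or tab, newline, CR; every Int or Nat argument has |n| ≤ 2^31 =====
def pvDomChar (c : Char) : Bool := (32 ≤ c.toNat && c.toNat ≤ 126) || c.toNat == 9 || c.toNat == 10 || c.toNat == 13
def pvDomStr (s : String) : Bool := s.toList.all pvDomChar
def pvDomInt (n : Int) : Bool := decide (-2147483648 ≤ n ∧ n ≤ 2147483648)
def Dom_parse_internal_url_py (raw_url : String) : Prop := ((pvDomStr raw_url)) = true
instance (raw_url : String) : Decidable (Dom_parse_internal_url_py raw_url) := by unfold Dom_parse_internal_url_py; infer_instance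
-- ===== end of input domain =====

-- B replaces A's chunk-by-chunk scan of the query with a single substring search for "&slug=" in "&" + query (alternative decomposition, same cost).

-- ===== PORT A =====
-- the loop 'for chunk in query.split("&")' with its continue/break logic
def pvSlugLoopA : List (List Char) → Option (List Char)
  | [] => none
  | chunk :: rest =>
    if chunk = [] then pvSlugLoopA rest
    else if PySem.Chars.isIn ['='] chunk = false then pvSlugLoopA rest
    else
      match PySem.Chars.splitOnMax chunk ['='] 1 with
      | key :: val :: _ => if key = "slug".toList then some val else pvSlugLoopA rest
      | _ => pvSlugLoopA rest  -- unreachable: "=" in chunk gives two parts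

def parse_internal_url_py (raw_url : String) : String × Option String :=
  match PySem.List.pyGet? (PySem.Chars.splitOnMax raw_url.toList "localnow://".toList 1) 1 with
  | none => ("", none)  -- IndexError: excluded by Pre_
  | some value =>
    if PySem.Chars.isIn ['?'] value = false then (String.ofList value, none)
    else
      match PySem.Chars.splitOnMax value ['?'] 1 with
      | scid :: query :: _ => (String.ofList scid, (pvSlugLoopA (PySem.Chars.splitOn query ['&'])).map String.ofList)
      | _ => ("", none)  -- unreachable: "?" in value gives two parts

-- ===== PORT B =====
def parse_internal_url_py_alt (raw_url : String) : String × Option String :=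
  match PySem.List.pyGet? (PySem.Chars.splitOnMax raw_url.toList "localnow://".toList 1) 1 with
  | none => ("", none)  -- IndexError: excluded by Pre_
  | some value =>
    if PySem.Chars.isIn ['?'] value = false then (String.ofList value, none)
    else
      match PySem.Chars.splitOnMax value ['?'] 1 with
      | scid :: query :: _ =>
        let padded := '&' :: query
        let i := PySem.Chars.find padded "&slug=".toList
        if i < 0 then (String.ofList scid, none)
        else
          match PySem.Chars.splitOnMax (PySem.List.slice padded (some (i + 6)) none) ['&'] 1 with
          | first :: _ => (String.ofList scid, some (String.ofList first))
          | [] => (String.ofList scid, none)  -- unreachable: split never returns []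
      | _ => ("", none)  -- unreachable: "?" in value gives two parts

-- ===== PRECONDITION & SPEC =====
-- A raises IndexError when "localnow://" does not occur in raw_url; Pre_ excludes exactly those inputs.
def Pre_parse_internal_url_py (raw_url : String) : Prop :=
  PySem.Str.isIn "localnow://" raw_url = true
instance (raw_url : String) : Decidable (Pre_parse_internal_url_py raw_url) := by unfold Pre_parse_internal_url_py; infer_instance
def pvWitness_parse_internal_url_py : String := "localnow://ch7?slug=abc"

def Spec_parse_internal_url_py (raw_url : String) (out : String × Option String) : Prop := out = parse_internal_url_py_alt raw_url
instance (raw_url : String) (out : String × Option String) : Decidable (Spec_parse_internal_url_py raw_url out) := by unfold Spec_parse_internal_url_py; infer_instance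

-- ===== CLAIM (what is proved, stated in full; the proofs are below) =====
def Claim_equal_parse_internal_url_py : Prop := ∀ (raw_url : String), Dom_parse_internal_url_py raw_url → Pre_parse_internal_url_py raw_url → Spec_parse_internal_url_py raw_url (parse_internal_url_py raw_url)

-- ===== LEMMAS AND PROOFS =====

def pvSplitAmp : List Char → List (List Char)
  | [] => [[]]
  | c :: t => if c = '&' then [] :: pvSplitAmp t
      else match pvSplitAmp t with
        | h :: r => (c :: h) :: r
        | [] => [[c]]

theorem pvSplitAmp_ne_nil (l : List Char) : pvSplitAmp l ≠ [] := by
  induction l with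
  | nil => simp [pvSplitAmp]
  | cons c t ih =>
    simp only [pvSplitAmp]
    split <;> simp
    split <;> simp

theorem splitOn_go_eq (fuel : Nat) (l cur : List Char) (acc : List (List Char)) (h : l.length ≤ fuel) :
    PySem.Chars.splitOn.go ['&'] fuel l cur acc =
      acc.reverse ++ (cur.reverse ++ (pvSplitAmp l).headD []) :: (pvSplitAmp l).tail := by
  induction fuel generalizing l cur acc with
  | zero =>
    cases l with
    | nil => simp [PySem.Chars.splitOn.go, pvSplitAmp]
    | cons c t => simp at h
  | succ fuel ih =>
    cases l with
    | nil => simp [PySem.Chars.splitOn.go, pvSplitAmp]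
    | cons c t =>
      simp only [PySem.Chars.splitOn.go]
      by_cases hc : c = '&'
      · subst hc
        rw [if_pos (by simp [List.isPrefixOf])]
        rw [show List.drop (['&'].length) ('&'::t) = t from rfl, ih t [] (cur.reverse :: acc) (by simpa using Nat.le_of_succ_le_succ (by simpa using h))]
        simp only [pvSplitAmp, if_pos rfl]
        rcases he : pvSplitAmp t with _ | ⟨hh, r⟩
        · exact absurd he (pvSplitAmp_ne_nil t)
        · simp
      · rw [if_neg (by simp [List.isPrefixOf, Ne.symm hc])]
        rw [ih t (c :: cur) acc (by simpa using Nat.le_of_succ_le_succ (by simpa using h))]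
        simp only [pvSplitAmp, if_neg hc]
        rcases he : pvSplitAmp t with _ | ⟨hh, r⟩
        · exact absurd he (pvSplitAmp_ne_nil t)
        · simp

theorem splitOn_amp (l : List Char) : PySem.Chars.splitOn l ['&'] = pvSplitAmp l := by
  rw [PySem.Chars.splitOn, splitOn_go_eq _ _ _ _ (Nat.le_succ _)]
  rcases he : pvSplitAmp l with _ | ⟨hh, r⟩
  · exact absurd he (pvSplitAmp_ne_nil l)
  · simp

theorem splitOnMax_go_zero (c : Char) (fuel : Nat) (l cur : List Char) (acc : List (List Char)) :
    PySem.Chars.splitOnMax.go [c] fuel 0 l cur acc = acc.reverse ++ [cur.reverse ++ l] := by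
  cases fuel with
  | zero => simp [PySem.Chars.splitOnMax.go]
  | succ fuel => cases l <;> simp [PySem.Chars.splitOnMax.go]

theorem splitOnMax_go_one (c : Char) (fuel : Nat) (l cur : List Char) (acc : List (List Char)) (h : l.length ≤ fuel) :
    PySem.Chars.splitOnMax.go [c] fuel 1 l cur acc =
      acc.reverse ++ (if c ∈ l then [cur.reverse ++ l.takeWhile (· ≠ c), (l.dropWhile (· ≠ c)).tail]
        else [cur.reverse ++ l]) := by
  induction fuel generalizing l cur acc with
  | zero =>
    cases l with
    | nil => simp [PySem.Chars.splitOnMax.go]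
    | cons d t => simp at h
  | succ fuel ih =>
    cases l with
    | nil => simp [PySem.Chars.splitOnMax.go]
    | cons d t =>
      simp only [PySem.Chars.splitOnMax.go]
      by_cases hc : d = c
      · subst hc
        rw [if_neg (by omega), if_pos (by simp [List.isPrefixOf])]
        rw [show List.drop ([d].length) (d::t) = t from rfl]
        rw [show (1 : Nat) - 1 = 0 from rfl, splitOnMax_go_zero]
        simp [List.takeWhile, List.dropWhile]
      · rw [if_neg (by omega), if_neg (by simp [List.isPrefixOf, Ne.symm hc])]
        rw [ih t (d :: cur) acc (by simpa using Nat.le_of_succ_le_succ (by simpa using h))]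
        by_cases hm : c ∈ t
        · simp [hm, hc, List.takeWhile_cons, List.dropWhile_cons, Ne.symm hc]
        · have : c ∈ d :: t ↔ False := by simp [hm, Ne.symm hc]
          simp [hm, this, hc]

theorem splitOnMax_one (c : Char) (l : List Char) :
    PySem.Chars.splitOnMax l [c] 1 =
      if c ∈ l then [l.takeWhile (· ≠ c), (l.dropWhile (· ≠ c)).tail] else [l] := by
  rw [PySem.Chars.splitOnMax, if_neg (by omega), show Int.toNat 1 = 1 from rfl, splitOnMax_go_one _ _ _ _ _ (Nat.le_succ _)]
  simp

theorem pvPrefix_takeWhile (p : Char → Bool) (pre l : List Char) (h : pre <+: l) (hp : ∀ x ∈ pre, p x = true) :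
    pre <+: l.takeWhile p := by
  induction pre generalizing l with
  | nil => simp
  | cons a pre ih =>
    obtain ⟨t, ht⟩ := h
    subst ht
    rw [List.cons_append, List.takeWhile_cons, if_pos (hp a (by simp))]
    obtain ⟨u, hu⟩ := ih (pre ++ t) ⟨t, rfl⟩ (fun x hx => hp x (by simp [hx]))
    exact ⟨u, by rw [List.cons_append, hu]⟩

theorem pvIsIn_singleton (c : Char) (l : List Char) : PySem.Chars.isIn [c] l = true ↔ c ∈ l := by
  rw [PySem.Chars.isIn_iff_infix]; exact List.singleton_infix_iff c l

theorem pvSlugLoopA_cons (c : List Char) (rest : List (List Char)) :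
    pvSlugLoopA (c :: rest) = if "slug=".toList <+: c then some (c.drop 5) else pvSlugLoopA rest := by
  by_cases h : "slug=".toList <+: c
  · obtain ⟨t, ht⟩ := h
    rw [if_pos ⟨t, ht⟩, ← ht]
    rw [show "slug=".toList = ['s','l','u','g','='] from rfl]
    simp only [pvSlugLoopA]
    rw [if_neg (by simp), if_neg (by simp [pvIsIn_singleton])]
    rw [splitOnMax_one, if_pos (by simp)]
    simp [List.takeWhile, List.dropWhile]
  · rw [if_neg h]
    simp only [pvSlugLoopA]
    by_cases hc : c = []
    · simp [hc]
    rw [if_neg hc]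
    by_cases hin : '=' ∈ c
    · rw [if_neg (by simp [pvIsIn_singleton, hin])]
      rw [splitOnMax_one, if_pos hin]
      have hdn : c.dropWhile (· ≠ '=') ≠ [] := by
        simp only [ne_eq, List.dropWhile_eq_nil_iff]
        push_neg
        exact ⟨'=', hin, by simp⟩
      have hhead := List.head_dropWhile_not (fun x => decide (x ≠ '=')) hdn
      have hdecomp : c.dropWhile (· ≠ '=') = '=' :: (c.dropWhile (· ≠ '=')).tail := by
        rw [← List.cons_head_tail hdn]
        simp at hhead
        simp [hhead]
      have hkeyne : ¬ (List.takeWhile (fun x => decide (x ≠ '=')) c = "slug".toList) := by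
        intro hkey
        apply h
        refine ⟨(c.dropWhile (· ≠ '=')).tail, ?_⟩
        conv_rhs => rw [← List.takeWhile_append_dropWhile (p := fun x => decide (x ≠ '=')) (l := c)]
        rw [hkey, hdecomp]
        rfl
      exact if_neg hkeyne
    · rw [if_pos (by simp [← pvIsIn_singleton '=' c] at hin; simp [hin])]

def pvSlugOf : List Char → Option (List Char)
  | cs =>
    if "slug=".toList <+: cs then some ((cs.drop 5).takeWhile (· ≠ '&'))
    else
      match h : cs.dropWhile (· ≠ '&') with
      | [] => none
      | _ :: t => pvSlugOf t
termination_by cs => cs.length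
decreasing_by
  have h1 := List.length_dropWhile_le (fun x => decide (x ≠ '&')) cs
  rw [h] at h1
  simp at h1 ⊢
  omega

theorem pvTakeWhile_of_not_mem (l : List Char) (h : '&' ∉ l) : l.takeWhile (· ≠ '&') = l := by
  rw [List.takeWhile_eq_self_iff]
  intro x hx
  simp
  rintro rfl
  exact h hx

theorem pvDropWhile_of_not_mem (l : List Char) (h : '&' ∉ l) : l.dropWhile (· ≠ '&') = [] := by
  rw [List.dropWhile_eq_nil_iff]
  intro x hx
  simp
  rintro rfl
  exact h hx

-- decomposition of a list at its first '&'
theorem pvAmpDecomp (cs : List Char) (h : '&' ∈ cs) :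
    cs = cs.takeWhile (· ≠ '&') ++ '&' :: (cs.dropWhile (· ≠ '&')).tail ∧ '&' ∉ cs.takeWhile (· ≠ '&') := by
  have hdn : cs.dropWhile (· ≠ '&') ≠ [] := by
    simp only [ne_eq, List.dropWhile_eq_nil_iff]
    push_neg
    exact ⟨'&', h, by simp⟩
  have hhead' : (cs.dropWhile (· ≠ '&')).head hdn = '&' := by
    have := List.head_dropWhile_not (fun x => decide (x ≠ '&')) hdn
    simpa using this
  have hd : cs.dropWhile (· ≠ '&') = '&' :: (cs.dropWhile (· ≠ '&')).tail := by
    conv_lhs => rw [← List.cons_head_tail hdn]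
    rw [hhead']
  constructor
  · conv_lhs => rw [← List.takeWhile_append_dropWhile (p := fun x => decide (x ≠ '&')) (l := cs), hd]
  · intro hmem
    have := List.mem_takeWhile_imp hmem
    simp at this

theorem pvSplitAmp_no_amp (cs : List Char) (h : '&' ∉ cs) : pvSplitAmp cs = [cs] := by
  induction cs with
  | nil => rfl
  | cons c t ih =>
    simp only [pvSplitAmp]
    rw [if_neg (by rintro rfl; exact h (by simp))]
    rw [ih (fun hm => h (by simp [hm]))]

theorem pvSplitAmp_append (pre post : List Char) (h : '&' ∉ pre) :
    pvSplitAmp (pre ++ '&' :: post) = pre :: pvSplitAmp post := by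
  induction pre with
  | nil => simp [pvSplitAmp]
  | cons c t ih =>
    simp only [List.cons_append, pvSplitAmp]
    rw [if_neg (by rintro rfl; exact h (by simp))]
    rw [ih (fun hm => h (by simp [hm]))]

theorem pvVal (cs : List Char) (h : "slug=".toList <+: cs) :
    (cs.takeWhile (· ≠ '&')).drop 5 = (cs.drop 5).takeWhile (· ≠ '&') := by
  obtain ⟨t, ht⟩ := h
  rw [show "slug=".toList = ['s','l','u','g','='] from rfl] at ht
  subst ht
  simp [List.takeWhile]

theorem pvDropWhile_ne_nil (cs : List Char) (h : '&' ∈ cs) : cs.dropWhile (· ≠ '&') ≠ [] := by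
  simp only [ne_eq, List.dropWhile_eq_nil_iff]
  push_neg
  exact ⟨'&', h, by simp⟩

theorem pvSlugAllNe : ∀ x ∈ "slug=".toList, (fun x => decide (x ≠ '&')) x = true := by
  intro x hx
  rw [show "slug=".toList = ['s','l','u','g','='] from rfl] at hx
  fin_cases hx <;> decide

theorem pvLA (cs : List Char) : pvSlugLoopA (pvSplitAmp cs) = pvSlugOf cs := by
  by_cases hm : '&' ∈ cs
  · obtain ⟨hdecomp, hpre⟩ := pvAmpDecomp cs hm
    have hne := pvDropWhile_ne_nil cs hm
    have hlen : ((cs.dropWhile (· ≠ '&')).tail).length < cs.length := by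
      have h1 := List.length_dropWhile_le (fun x => decide (x ≠ '&')) cs
      rcases he : cs.dropWhile (· ≠ '&') with _ | ⟨d, t⟩
      · exact absurd he hne
      · rw [he] at h1; simp at h1 ⊢; omega
    have ih := pvLA ((cs.dropWhile (· ≠ '&')).tail)
    conv_lhs => rw [hdecomp, pvSplitAmp_append _ _ hpre]
    rw [pvSlugLoopA_cons]
    rw [pvSlugOf]
    by_cases hp : "slug=".toList <+: cs
    · rw [if_pos (pvPrefix_takeWhile _ _ _ hp pvSlugAllNe), if_pos hp]
      rw [show cs.takeWhile (· ≠ '&') = List.takeWhile (fun x => decide (x ≠ '&')) cs from rfl,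
         pvVal cs hp]
    · rw [if_neg ?_, if_neg hp]
      · split
        · next heq => exact absurd heq hne
        · next d t heq =>
          have heq' : cs.dropWhile (· ≠ '&') = d :: t := by simpa using heq
          rw [heq'] at ih ⊢
          simp only [List.tail_cons] at ih
          exact ih
      · intro hppre
        exact hp (hppre.trans ⟨'&' :: (cs.dropWhile (· ≠ '&')).tail, hdecomp.symm⟩)
  · rw [pvSplitAmp_no_amp cs hm, pvSlugLoopA_cons, pvSlugOf]
    by_cases hp : "slug=".toList <+: cs
    · rw [if_pos hp, if_pos hp]
      have : '&' ∉ cs.drop 5 := fun hx => hm (List.drop_subset 5 cs hx)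
      rw [pvTakeWhile_of_not_mem _ this]
    · rw [if_neg hp, if_neg hp]
      split
      · rfl
      · next d t heq =>
        exfalso
        have := pvDropWhile_of_not_mem cs hm
        rw [heq] at this
        simp at this
termination_by cs.length
decreasing_by simpa [List.length_tail] using hlen

theorem pvFindEqNat (l sub : List Char) (n : Nat) (hp : sub <+: l.drop n)
    (hmin : ∀ m < n, ¬ sub <+: l.drop m) : PySem.Chars.find l sub = n := by
  have hin : PySem.Chars.isIn sub l = true :=
    (PySem.Chars.exists_prefix_drop_iff_isIn (s := l) (sub := sub)).mp ⟨n, hp⟩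
  have hnn : 0 ≤ PySem.Chars.find l sub :=
    (PySem.Chars.find_nonneg_iff l sub).mpr ((PySem.Chars.isIn_iff_infix _ _).mp hin)
  obtain ⟨hp2, hmin2⟩ := PySem.Chars.find_spec (s := l) (sub := sub) hnn
  rcases lt_trichotomy ((PySem.Chars.find l sub).toNat) n with h | h | h
  · exact absurd hp2 (hmin _ h)
  · omega
  · exact absurd hp (hmin2 n h)

theorem pvHeadAmp (l : List Char) (h : "&slug=".toList <+: l) : ∃ u, l = '&' :: u := by
  obtain ⟨t, ht⟩ := h
  exact ⟨_, ht.symm⟩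

theorem pvPrefixZero (cs : List Char) (h : "&slug=".toList <+: ('&' :: cs)) : "slug=".toList <+: cs := by
  obtain ⟨t, ht⟩ := h
  rw [show "&slug=".toList = '&' :: "slug=".toList from rfl, List.cons_append] at ht
  exact ⟨t, by injection ht⟩

theorem pvZeroPrefix (cs : List Char) (h : "slug=".toList <+: cs) : "&slug=".toList <+: ('&' :: cs) := by
  obtain ⟨t, ht⟩ := h
  exact ⟨t, by rw [show "&slug=".toList = '&' :: "slug=".toList from rfl, List.cons_append, ht]⟩

-- an occurrence of "&slug=" inside cs cannot start before the first '&' of cs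
theorem pvOccGe (pre post : List Char) (hpre : '&' ∉ pre) (m : Nat) (hm : m < pre.length)
    (h : "&slug=".toList <+: (pre ++ post).drop m) : False := by
  rw [List.drop_append_of_le_length (Nat.le_of_lt hm)] at h
  obtain ⟨u, hu⟩ := pvHeadAmp _ h
  have hne : pre.drop m ≠ [] := by
    intro hnil
    rw [hnil] at hu
    have : pre.length ≤ m := by
      have := List.drop_eq_nil_iff.mp hnil
      omega
    omega
  rcases he : pre.drop m with _ | ⟨d, u'⟩
  · exact hne he
  · have hd : d ∈ pre := by
      have : d ∈ pre.drop m := by rw [he]; simp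
      exact List.drop_subset m pre this
    rw [he] at hu
    simp at hu
    exact hpre (hu.1 ▸ hd)

theorem pvLB (cs : List Char) :
    (if PySem.Chars.find ('&' :: cs) "&slug=".toList < 0 then none
     else some ((('&' :: cs).drop ((PySem.Chars.find ('&' :: cs) "&slug=".toList).toNat + 6)).takeWhile (· ≠ '&')))
    = pvSlugOf cs := by
  rw [pvSlugOf]
  by_cases hp : "slug=".toList <+: cs
  · have hf : PySem.Chars.find ('&' :: cs) "&slug=".toList = ((0 : Nat) : Int) :=
      pvFindEqNat _ _ 0 (by simpa using pvZeroPrefix cs hp) (fun m hm => absurd hm (Nat.not_lt_zero m))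
    rw [hf, if_neg (by omega), if_pos hp]
    norm_num
  · rw [if_neg hp]
    by_cases hm : '&' ∈ cs
    · obtain ⟨hdecomp, hpre⟩ := pvAmpDecomp cs hm
      have hne := pvDropWhile_ne_nil cs hm
      set pre := cs.takeWhile (· ≠ '&') with hpredef
      set post := (cs.dropWhile (· ≠ '&')).tail with hpostdef
      have hlen : post.length < cs.length := by
        have h1 := List.length_dropWhile_le (fun x => decide (x ≠ '&')) cs
        have h2 : post.length + 1 ≤ (cs.dropWhile (· ≠ '&')).length := by
          rw [hpostdef]
          rcases he : cs.dropWhile (· ≠ '&') with _ | ⟨d, t⟩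
          · exact absurd he hne
          · simp
        omega
      have ih := pvLB post
      have hshift : ∀ k : Nat, ('&' :: cs).drop (pre.length + 1 + k) = ('&' :: post).drop k := by
        intro k
        have hcons : ('&' :: cs) = ('&' :: pre) ++ '&' :: post := by
          rw [List.cons_append, ← hdecomp]
        rw [hcons, show pre.length + 1 + k = ('&' :: pre).length + k from by simp]
        exact List.drop_length_add_append k
      have hocclow : ∀ m' : Nat, m' < pre.length → ¬ "&slug=".toList <+: cs.drop m' := by
        intro m' hcase hmp
        exact pvOccGe pre ('&' :: post) hpre m' hcase (by rw [← hdecomp]; exact hmp)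
      have hocchigh : ∀ m' : Nat, pre.length ≤ m' → cs.drop m' = ('&' :: post).drop (m' - pre.length) := by
        intro m' hcase
        conv_lhs => rw [hdecomp, show m' = pre.length + (m' - pre.length) from by omega]
        exact List.drop_length_add_append _
      by_cases hocc : 0 ≤ PySem.Chars.find ('&' :: post) "&slug=".toList
      · obtain ⟨hp2, hmin2⟩ := PySem.Chars.find_spec (s := '&' :: post) (sub := "&slug=".toList) hocc
        set f2 := (PySem.Chars.find ('&' :: post) "&slug=".toList).toNat with hf2
        have hf : PySem.Chars.find ('&' :: cs) "&slug=".toList = ((pre.length + 1 + f2 : Nat) : Int) := by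
          apply pvFindEqNat
          · rw [hshift f2]; exact hp2
          · intro m hmlt hmp
            rcases m with _ | m'
            · exact hp (pvPrefixZero cs (by simpa using hmp))
            · rw [List.drop_succ_cons] at hmp
              by_cases hcase : m' < pre.length
              · exact hocclow m' hcase hmp
              · rw [hocchigh m' (by omega)] at hmp
                exact hmin2 (m' - pre.length) (by omega) hmp
        rw [hf, if_neg (by omega)]
        rw [Int.toNat_natCast]
        rw [show pre.length + 1 + f2 + 6 = pre.length + 1 + (f2 + 6) from by omega, hshift (f2 + 6)]
        rw [if_neg (by omega)] at ih
        split
        · next heq => exact absurd heq hne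
        · next d t heq =>
          have heq' : cs.dropWhile (· ≠ '&') = d :: t := by simpa using heq
          have hpt : post = t := by rw [hpostdef, heq', List.tail_cons]
          rw [← hpt]
          exact ih
      · have hf2neg : PySem.Chars.find ('&' :: post) "&slug=".toList = -1 := by
          have := PySem.Chars.neg_one_le_find ('&' :: post) "&slug=".toList
          omega
        have hni : ¬ "&slug=".toList <:+: ('&' :: cs) := by
          intro hinf
          obtain ⟨j, hj⟩ := (PySem.Chars.exists_prefix_drop_iff_isIn (s := '&' :: cs) (sub := "&slug=".toList)).mpr
            ((PySem.Chars.isIn_iff_infix _ _).mpr hinf)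
          rcases j with _ | m'
          · exact hp (pvPrefixZero cs (by simpa using hj))
          · rw [List.drop_succ_cons] at hj
            by_cases hcase : m' < pre.length
            · exact hocclow m' hcase hj
            · rw [hocchigh m' (by omega)] at hj
              have : "&slug=".toList <:+: ('&' :: post) :=
                ((PySem.Chars.isIn_iff_infix _ _).mp
                  ((PySem.Chars.exists_prefix_drop_iff_isIn (s := '&' :: post) (sub := "&slug=".toList)).mp
                    ⟨m' - pre.length, hj⟩))
              have := (PySem.Chars.find_ne_neg_one_iff ('&' :: post) "&slug=".toList).mpr this
              exact this hf2neg
        rw [if_pos (by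
          have := (PySem.Chars.find_eq_neg_one_iff ('&' :: cs) "&slug=".toList).mpr hni
          omega)]
        rw [if_pos (by omega)] at ih
        split
        · next heq => exact absurd heq hne
        · next d t heq =>
          have heq' : cs.dropWhile (· ≠ '&') = d :: t := by simpa using heq
          have hpt : post = t := by rw [hpostdef, heq', List.tail_cons]
          rw [← hpt]
          exact ih
    · have hni : ¬ "&slug=".toList <:+: ('&' :: cs) := by
        intro hinf
        obtain ⟨j, hj⟩ := (PySem.Chars.exists_prefix_drop_iff_isIn (s := '&' :: cs) (sub := "&slug=".toList)).mpr
          ((PySem.Chars.isIn_iff_infix _ _).mpr hinf)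
        rcases j with _ | k
        · exact hp (pvPrefixZero cs (by simpa using hj))
        · rw [List.drop_succ_cons] at hj
          obtain ⟨u, hu⟩ := pvHeadAmp _ hj
          have : '&' ∈ cs := List.drop_subset k cs (by rw [hu]; simp)
          exact hm this
      rw [if_pos (by
        have := (PySem.Chars.find_eq_neg_one_iff ('&' :: cs) "&slug=".toList).mpr hni
        omega)]
      split
      · rfl
      · next d t heq =>
        exfalso
        have := pvDropWhile_of_not_mem cs hm
        rw [heq] at this
        simp at this
termination_by cs.length
decreasing_by exact hlen

-- ===== VERDICT (by name: the statement is the Claim_ definition above) =====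
theorem parse_internal_url_py_spec : Claim_equal_parse_internal_url_py := by
  intro raw _ _
  unfold Spec_parse_internal_url_py parse_internal_url_py parse_internal_url_py_alt
  cases hv : PySem.List.pyGet? (PySem.Chars.splitOnMax raw.toList "localnow://".toList 1) 1 with
  | none => rfl
  | some value =>
    dsimp only
    by_cases hq : PySem.Chars.isIn ['?'] value = false
    · rw [if_pos hq, if_pos hq]
    · rw [if_neg hq, if_neg hq]
      cases hsp : PySem.Chars.splitOnMax value ['?'] 1 with
      | nil => rfl
      | cons a rest =>
        cases rest with
        | nil => rfl
        | cons b rest2 =>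
          dsimp only
          rw [splitOn_amp, pvLA b, ← pvLB b]
          by_cases hneg : PySem.Chars.find ('&' :: b) "&slug=".toList < 0
          · rw [if_pos hneg, if_pos hneg]
            rfl
          · rw [if_neg hneg, if_neg hneg]
            have h6 : (0:Int) ≤ PySem.Chars.find ('&' :: b) "&slug=".toList + 6 := by omega
            rw [PySem.List.slice_from ('&' :: b) h6]
            have h7 : (PySem.Chars.find ('&' :: b) "&slug=".toList + 6).toNat
                = (PySem.Chars.find ('&' :: b) "&slug=".toList).toNat + 6 := by omega
            rw [h7, splitOnMax_one]
            by_cases hmem : '&' ∈ (('&' :: b).drop ((PySem.Chars.find ('&' :: b) "&slug=".toList).toNat + 6))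
            · rw [if_pos hmem]
              rfl
            · rw [if_neg hmem]
              rw [pvTakeWhile_of_not_mem _ hmem]
              rfl
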